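-- pv_equiv track=rewrite | github.com/apstenku123/nanochat | scripts/comments/merge_translations.py | find_proximity_match
-- ===== SOURCE A (Python) =====
-- from bisect import bisect_left
--
-- def find_proximity_match(file_index, file_path, byte_start, tolerance):
--     """Find the closest translated record within tolerance bytes."""
--     if file_path not in file_index:
--         return None
--
--     entries = file_index[file_path]
--     starts = [e[0] for e in entries]
--
--     # Binary search for closest
--     idx = bisect_left(starts, byte_start)
--
--     best = None
--     best_dist = tolerance + 1
--
--     # Check idx-1, idx, idx+1
--     for i in range(max(0, idx - 1), min(len(entries), idx + 2)):
--         dist = abs(entries[i][0] - byte_start)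
--         if dist <= tolerance and dist < best_dist:
--             best = entries[i][1]
--             best_dist = dist
--
--     return best
-- ===== SOURCE B (Python) =====
-- def find_proximity_match(file_index, file_path, byte_start, tolerance):
--     """Find the closest translated record within tolerance bytes."""
--     if file_path not in file_index:
--         return None
--     best = None  # (dist, text)
--     for start, text in file_index[file_path]:
--         dist = abs(start - byte_start)
--         if best is None or dist < best[0] or (dist == best[0] and start < byte_start):
--             best = (dist, text)
--     if best is not None and best[0] <= tolerance:
--         return best[1]
--     return None
-- ===== Notes on version B (the rewrite author's own statement) =====
-- stated objective: simpler
-- what changed: B replaces A's starts-list rebuild + bisect_left + three-candidate window loop by one linear scan that keeps the closest record seen so far (on distance ties preferring a record that starts before byte_start, which is exactly A's window choice); Pre_ excludes file_index whose looked-up entry list is not sorted by byte start, where bisect_left's sorted-input contract is violated and A's window pick is an accident of the binary search.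
-- outside the precondition, e.g. on find_proximity_match({'f': [(5, 'a'), (0, 'b')]}, 'f', 5, 5): A returns 'b', B returns 'a'
import Mathlib
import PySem

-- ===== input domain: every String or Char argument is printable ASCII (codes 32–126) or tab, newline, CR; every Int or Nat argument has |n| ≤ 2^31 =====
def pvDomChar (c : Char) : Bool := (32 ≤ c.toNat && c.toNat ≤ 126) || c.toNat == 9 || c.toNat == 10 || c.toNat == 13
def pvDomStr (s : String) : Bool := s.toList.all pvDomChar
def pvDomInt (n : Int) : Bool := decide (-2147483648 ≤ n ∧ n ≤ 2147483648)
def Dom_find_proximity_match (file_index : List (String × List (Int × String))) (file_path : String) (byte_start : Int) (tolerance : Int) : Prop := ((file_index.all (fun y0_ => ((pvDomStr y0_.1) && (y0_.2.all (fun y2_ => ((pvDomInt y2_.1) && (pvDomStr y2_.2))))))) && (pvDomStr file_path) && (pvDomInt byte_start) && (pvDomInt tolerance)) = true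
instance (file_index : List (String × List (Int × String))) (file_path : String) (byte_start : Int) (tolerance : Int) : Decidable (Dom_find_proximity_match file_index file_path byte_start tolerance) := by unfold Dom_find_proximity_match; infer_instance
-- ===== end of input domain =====

-- B replaces A's starts-list rebuild + bisect + three-candidate window loop by one linear scan
-- keeping the closest record so far (equal to A's choice on byte-start-sorted entry lists, Pre_).


-- ===== PORT A =====
def find_proximity_match (file_index : List (String × List (Int × String))) (file_path : String) (byte_start : Int) (tolerance : Int) : Option String :=
  match PySem.Dict.get? (PySem.Dict.mk file_index) file_path with
  | none => none                       -- 'if file_path not in file_index: return None'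
  | some entries =>
    let starts := entries.map (fun e => e.1)
    let idx : Nat := PySem.List.bisectLeft starts byte_start
    let res :=
      (PySem.List.pyRange (max 0 ((idx : Int) - 1)) (min ((entries.length : Int)) ((idx : Int) + 2)) 1).foldl
        (fun (st : Option String × Int) i =>
          let e := PySem.List.pyGetD entries i (0, "")
          let dist := |e.1 - byte_start|
          if dist ≤ tolerance ∧ dist < st.2 then (some e.2, dist) else st)
        (none, tolerance + 1)
    res.1

-- ===== PORT B =====
-- Source B's loop body: best is None / (dist, text); update on strictly smaller dist, or on an
-- equal dist when the record starts before byte_start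
def pvScanStep (x : Int) (b : Option (Int × String)) (e : Int × String) : Option (Int × String) :=
  let dist := |e.1 - x|
  match b with
  | none => some (dist, e.2)
  | some p => if dist < p.1 ∨ (dist = p.1 ∧ e.1 < x) then some (dist, e.2) else some p

def find_proximity_match_alt (file_index : List (String × List (Int × String))) (file_path : String) (byte_start : Int) (tolerance : Int) : Option String :=
  match PySem.Dict.get? (PySem.Dict.mk file_index) file_path with
  | none => none
  | some entries =>
    match entries.foldl (pvScanStep byte_start) none with
    | none => none
    | some p => if p.1 ≤ tolerance then some p.2 else none

-- ===== PRECONDITION & SPEC =====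
-- Pre_ excludes file_index whose looked-up entry list is not sorted by byte start: bisect_left's
-- contract requires sorted input, and A's window pick on unsorted data is an accident of the binary search.
def Pre_find_proximity_match (file_index : List (String × List (Int × String))) (file_path : String) (byte_start : Int) (tolerance : Int) : Prop :=
  List.Pairwise (fun a b => a.1 ≤ b.1) ((PySem.Dict.get? (PySem.Dict.mk file_index) file_path).getD [])
instance (file_index : List (String × List (Int × String))) (file_path : String) (byte_start : Int) (tolerance : Int) : Decidable (Pre_find_proximity_match file_index file_path byte_start tolerance) := by unfold Pre_find_proximity_match; infer_instance

def pvWitness_find_proximity_match : (List (String × List (Int × String))) × String × Int × Int :=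
  ([("f", [(0, "a"), (2, "b")])], "f", 1, 1)

def Spec_find_proximity_match (file_index : List (String × List (Int × String))) (file_path : String) (byte_start : Int) (tolerance : Int) (out : Option String) : Prop := out = find_proximity_match_alt file_index file_path byte_start tolerance
instance (file_index : List (String × List (Int × String))) (file_path : String) (byte_start : Int) (tolerance : Int) (out : Option String) : Decidable (Spec_find_proximity_match file_index file_path byte_start tolerance out) := by unfold Spec_find_proximity_match; infer_instance

-- ===== CLAIM (what is proved, stated in full; the proofs are below) =====
def Claim_equal_find_proximity_match : Prop := ∀ (file_index : List (String × List (Int × String))) (file_path : String) (byte_start : Int) (tolerance : Int), Dom_find_proximity_match file_index file_path byte_start tolerance → Pre_find_proximity_match file_index file_path byte_start tolerance → Spec_find_proximity_match file_index file_path byte_start tolerance (find_proximity_match file_index file_path byte_start tolerance)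

-- ===== LEMMAS AND PROOFS =====

-- a for-loop over range(a, b) reading xs[i] is a fold over the slice xs[a:b]  (0 ≤ a, b ≤ len xs)
theorem foldl_pyRange_pyGetD_drop_take {α β : Type} (xs : List α) (d : α) (f : β → α → β) :
    ∀ (n : Nat) (a b : Int) (init : β), (b - a).toNat = n → 0 ≤ a → b ≤ (xs.length : Int) →
      (PySem.List.pyRange a b 1).foldl (fun acc i => f acc (PySem.List.pyGetD xs i d)) init
        = ((xs.drop a.toNat).take (b.toNat - a.toNat)).foldl f init := by
  intro n
  induction n with
  | zero =>
    intro a b init hn h0 hb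
    have hba : b ≤ a := by omega
    have h1 : PySem.List.pyRange a b 1 = [] := by
      simp [PySem.List.pyRange]; omega
    have h2 : b.toNat - a.toNat = 0 := by omega
    simp [h1, h2]
  | succ n ih =>
    intro a b init hn h0 hb
    have hab : a < b := by omega
    have ha : a.toNat < xs.length := by omega
    rw [PySem.List.pyRange_one_cons hab]
    have hdrop : xs.drop a.toNat = xs[a.toNat] :: xs.drop (a.toNat + 1) :=
      List.drop_eq_getElem_cons ha
    have htake : b.toNat - a.toNat = (b.toNat - (a + 1).toNat) + 1 := by omega
    rw [hdrop, htake, List.take_succ_cons, List.foldl_cons, List.foldl_cons]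
    rw [PySem.List.pyGetD_eq_getElem xs d h0 (show a < (xs.length : Int) by omega)]
    have := ih (a + 1) b (f init xs[a.toNat]) (by omega) (by omega) hb
    rw [this]
    have : (a + 1).toNat = a.toNat + 1 := by omega
    rw [this]

-- min? over the head of a cons list, Int-valued key
theorem min?_cons_int {α : Type} (key : α → Int) (e : α) (l : List α) :
    PySem.List.min? (e :: l) key
      = some (match PySem.List.min? l key with
              | none => e
              | some m => if key m < key e then m else e) := by
  induction l generalizing e with
  | nil => rfl
  | cons x l ih =>
    have h1 : PySem.List.min? (e :: x :: l) key
        = PySem.List.min? ((if key x < key e then x else e) :: l) key := by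
      simp only [PySem.List.min?, List.foldl_cons]
      by_cases h : key x < key e <;> simp [h]
    rw [h1, ih, ih x]
    rcases hm : PySem.List.min? l key with _ | m
    · rfl
    · by_cases h1 : key x < key e
      · simp only [if_pos h1]
        by_cases h2 : key m < key x
        · rw [if_pos h2, if_pos (show key m < key e by omega)]
        · rw [if_neg h2, if_pos h1]
      · simp only [if_neg h1]
        by_cases h2 : key m < key x
        · rw [if_pos h2]
        · rw [if_neg h2, if_neg (show ¬ key m < key e by omega), if_neg h1]

-- if the head has the (weakly) smallest key, min? (FIRST extremal) picks the head
theorem min?_cons_of_le (x : Int) (r : Int × String) (l : List (Int × String))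
    (h : ∀ e ∈ l, |r.1 - x| ≤ |e.1 - x|) :
    PySem.List.min? (r :: l) (fun e => |e.1 - x|) = some r := by
  rw [min?_cons_int]
  rcases hm : PySem.List.min? l (fun e => |e.1 - x|) with _ | m
  · rfl
  · have hmem := PySem.List.min?_mem hm
    have := h m hmem
    simp only []
    rw [if_neg (by omega)]

-- the running-strict-min accumulator loop computes (first minimal element, its key) — provided bd ≤ tol + 1
theorem foldl_best_eq_min? (tol : Int) (key : Int × String → Int) (l : List (Int × String)) :
    ∀ (b : Option String) (bd : Int), bd ≤ tol + 1 →
      l.foldl (fun (st : Option String × Int) e =>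
          if key e ≤ tol ∧ key e < st.2 then (some e.2, key e) else st) (b, bd)
        = match PySem.List.min? l key with
          | none => (b, bd)
          | some m => if key m < bd then (some m.2, key m) else (b, bd) := by
  induction l with
  | nil => intro b bd _; rfl
  | cons e l ih =>
    intro b bd hbd
    rw [List.foldl_cons, min?_cons_int]
    have hc : (key e ≤ tol ∧ key e < bd) ↔ key e < bd := by omega
    by_cases he : key e < bd
    · rw [if_pos (hc.mpr he), ih (some e.2) (key e) (by omega)]
      cases hm : PySem.List.min? l key with
      | none => simp only []; rw [if_pos he]
      | some m =>
        simp only []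
        by_cases h2 : key m < key e
        · simp only [if_pos h2]
          rw [if_pos (show key m < bd by omega)]
        · simp only [if_neg h2]
          rw [if_pos he]
    · rw [if_neg (fun hcc => he (hc.mp hcc)), ih b bd hbd]
      cases hm : PySem.List.min? l key with
      | none => simp only []; rw [if_neg he]
      | some m =>
        simp only []
        by_cases h2 : key m < key e
        · simp only [if_pos h2]
        · simp only [if_neg h2]
          rw [if_neg (show ¬ key m < bd by omega), if_neg he]

-- once the held distance is ≤ every remaining distance and every remaining start is ≥ x, the scan is frozen
theorem scan_no_update (x : Int) (p : Int × String) (l : List (Int × String))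
    (h : ∀ e ∈ l, x ≤ e.1 ∧ p.1 ≤ |e.1 - x|) :
    l.foldl (pvScanStep x) (some p) = some p := by
  induction l with
  | nil => rfl
  | cons e t ih =>
    have he := h e (by simp)
    rw [List.foldl_cons]
    have hstep : pvScanStep x (some p) e = some p := by
      simp only [pvScanStep]
      rw [if_neg (by omega)]
    rw [hstep]
    exact ih (fun f hf => h f (by simp [hf]))

-- scanning a sorted all-below-x block: every element (weakly) improves, the last one is kept
theorem scanL_aux (x : Int) :
    ∀ (l : List (Int × String)) (e : Int × String),
      (∀ f ∈ l, f.1 < x) → (∀ f ∈ l, e.1 ≤ f.1) → List.Pairwise (fun a b => a.1 ≤ b.1) l →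
      l.foldl (pvScanStep x) (some (|e.1 - x|, e.2))
        = some (|(l.getLastD e).1 - x|, (l.getLastD e).2) := by
  intro l
  induction l with
  | nil => intro e _ _ _; rfl
  | cons f t ih =>
    intro e hlt hle hs
    have hf : f.1 < x := hlt f (by simp)
    have hef : e.1 ≤ f.1 := hle f (by simp)
    rw [List.foldl_cons]
    have hstep : pvScanStep x (some (|e.1 - x|, e.2)) f = some (|f.1 - x|, f.2) := by
      have h1 : |f.1 - x| = x - f.1 := by rw [abs_of_nonpos (by omega)]; omega
      have h2 : |e.1 - x| = x - e.1 := by rw [abs_of_nonpos (by omega)]; omega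
      simp only [pvScanStep]
      by_cases hc : |f.1 - x| < |e.1 - x|
      · rw [if_pos (Or.inl hc)]
      · rw [if_pos (Or.inr ⟨by omega, hf⟩)]
    rw [hstep, List.getLastD_cons]
    rcases List.pairwise_cons.mp hs with ⟨hfle, hst⟩
    exact ih f (fun g hg => hlt g (by simp [hg])) hfle hst

theorem scanL_full (x : Int) (l : List (Int × String)) (hl : l ≠ [])
    (hlt : ∀ f ∈ l, f.1 < x) (hs : List.Pairwise (fun a b => a.1 ≤ b.1) l) :
    l.foldl (pvScanStep x) none = some (|(l.getLast hl).1 - x|, (l.getLast hl).2) := by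
  cases l with
  | nil => exact absurd rfl hl
  | cons e t =>
    rw [List.foldl_cons]
    have hstep : pvScanStep x none e = some (|e.1 - x|, e.2) := rfl
    rw [hstep]
    rcases List.pairwise_cons.mp hs with ⟨hele, hst⟩
    rw [scanL_aux x t e (fun g hg => hlt g (by simp [hg])) hele hst]
    rw [List.getLast_eq_getLastD hl]

-- A's window gate and B's final gate agree on the same (key, text) pair
theorem gate_eq (k t : Int) (s : String) :
    (if k < t + 1 then ((some s : Option String), k) else (none, t + 1)).1
      = if k ≤ t then some s else none := by
  by_cases h : k ≤ t
  · rw [if_pos (by omega), if_pos h]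
  · rw [if_neg (by omega), if_neg h]

-- ===== VERDICT (by name: the statement is the Claim_ definition above) =====
theorem find_proximity_match_spec : Claim_equal_find_proximity_match := by
  intro file_index file_path x tol _ hpre
  unfold Spec_find_proximity_match find_proximity_match find_proximity_match_alt
  cases hget : PySem.Dict.get? (PySem.Dict.mk file_index) file_path with
  | none => rfl
  | some entries =>
    simp only []
    unfold Pre_find_proximity_match at hpre
    rw [hget] at hpre
    simp only [Option.getD_some] at hpre
    have hs : List.Pairwise (fun (a b : Int × String) => a.1 ≤ b.1) entries := hpre
    have hss : List.Pairwise (fun a b => a ≤ b) (entries.map (fun e => e.1)) :=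
      List.pairwise_map.mpr hs
    obtain ⟨hlen, hLs, hRs⟩ := PySem.List.bisectLeft_spec (entries.map (fun e => e.1)) x hss
    set idx : Nat := PySem.List.bisectLeft (entries.map (fun e => e.1)) x with hidx
    rw [List.length_map] at hlen
    set n := entries.length with hn
    have hL : ∀ (j : Nat) (hj : j < n), j < idx → entries[j].1 < x := by
      intro j hj hji
      have := hLs j (by simpa using hj) hji
      simpa using this
    have hR : ∀ (j : Nat) (hj : j < n), idx ≤ j → x ≤ entries[j].1 := by
      intro j hj hji
      have := hRs j (by simpa using hj) hji
      simpa using this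
    set key : Int × String → Int := fun e => |e.1 - x| with hkey
    set a : Int := max 0 ((idx : Int) - 1) with ha
    have h0a : 0 ≤ a := by omega
    have hbmin : min ((n : Int)) ((idx : Int) + 2) ≤ (n : Int) := by omega
    -- A's loop = fold over the candidate sublist, then its first-minimum
    rw [foldl_pyRange_pyGetD_drop_take entries (0, "")
        (fun st e => if key e ≤ tol ∧ key e < st.2 then (some e.2, key e) else st)
        ((min ((n : Int)) ((idx : Int) + 2)) - a).toNat a
        (min ((n : Int)) ((idx : Int) + 2)) (none, tol + 1) rfl h0a hbmin]
    rw [foldl_best_eq_min? tol key _ none (tol + 1) (le_refl _)]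
    set W := ((entries.drop a.toNat).take ((min ((n : Int)) ((idx : Int) + 2)).toNat - a.toNat)) with hW
    -- B's loop = scan of take idx, then of drop idx
    have hBsplit : entries.foldl (pvScanStep x) none
        = (entries.drop idx).foldl (pvScanStep x) ((entries.take idx).foldl (pvScanStep x) none) := by
      conv_lhs => rw [← List.take_append_drop idx entries]
      rw [List.foldl_append]
    rw [hBsplit]
    rcases Nat.eq_zero_or_pos idx with hidx0 | hidx1
    · -- idx = 0: no left block
      have hallge : ∀ e ∈ entries, x ≤ e.1 := by
        intro e he
        rcases List.mem_iff_getElem.mp he with ⟨j, hj, rfl⟩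
        exact hR j hj (by omega)
      have ha0 : a.toNat = 0 := by omega
      cases hentries : entries with
      | nil =>
        have hWnil : W = [] := by rw [hW, hentries]; simp
        rw [hWnil, List.take_nil, List.drop_nil]
        rfl
      | cons r rest =>
        have hn1 : 1 ≤ n := by rw [hn, hentries]; simp
        obtain ⟨t, ht⟩ : ∃ t, (min ((n : Int)) ((idx : Int) + 2)).toNat - a.toNat = t + 1 :=
          ⟨(min ((n : Int)) ((idx : Int) + 2)).toNat - a.toNat - 1, by omega⟩
        have hWc : W = r :: rest.take t := by
          rw [hW, ht, ha0, List.drop_zero, hentries, List.take_succ_cons]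
        have hge_rest : ∀ e ∈ rest, x ≤ e.1 ∧ key r ≤ key e := by
          intro e he
          have hxr : x ≤ r.1 := hallge r (by rw [hentries]; simp)
          have hxe : x ≤ e.1 := hallge e (by rw [hentries]; simp [he])
          have hre : r.1 ≤ e.1 := by
            rw [hentries] at hs
            exact (List.pairwise_cons.mp hs).1 e he
          refine ⟨hxe, ?_⟩
          rw [hkey]
          simp only []
          rw [abs_of_nonneg (by omega), abs_of_nonneg (by omega)]
          omega
        -- A side
        have hminW : PySem.List.min? W key = some r := by
          rw [hWc, hkey]
          exact min?_cons_of_le x r _ (fun e he => (hge_rest e (List.take_subset _ _ he)).2)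
        rw [hminW]
        -- B side
        have hBfold : ((r :: rest).drop idx).foldl (pvScanStep x) (((r :: rest).take idx).foldl (pvScanStep x) none)
            = some (key r, r.2) := by
          rw [hidx0, List.take_zero, List.drop_zero, List.foldl_nil, List.foldl_cons]
          have hstep : pvScanStep x none r = some (|r.1 - x|, r.2) := rfl
          rw [hstep]
          exact scan_no_update x _ rest (fun e he => (hge_rest e he))
        rw [hBfold]
        exact gate_eq (key r) tol r.2
    · -- idx ≥ 1: left block nonempty, its last element is entries[idx-1]
      have han : a.toNat = idx - 1 := by omega
      have hidxn : idx - 1 < n := by omega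
      set eL : Int × String := entries[idx - 1] with heL
      have heLlt : eL.1 < x := hL (idx - 1) hidxn (by omega)
      have hdrop1 : entries.drop (idx - 1) = eL :: entries.drop idx := by
        have hh := List.drop_eq_getElem_cons (l := entries) (i := idx - 1) (show idx - 1 < entries.length by omega)
        have h2 : idx - 1 + 1 = idx := by omega
        rw [heL, hh, h2]
      -- B's left fold
      have htne : entries.take idx ≠ [] := by
        have : (entries.take idx).length = idx := by simp only [List.length_take]; omega
        intro hcon; rw [hcon] at this; simp at this; omega
      have htlast : (entries.take idx).getLast htne = eL := by
        rw [List.getLast_eq_getElem]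
        have hlt : (entries.take idx).length = idx := by simp only [List.length_take]; omega
        simp only [hlt]
        rw [List.getElem_take]
      have hBL : (entries.take idx).foldl (pvScanStep x) none = some (key eL, eL.2) := by
        rw [scanL_full x _ htne
            (fun f hf => by
              rcases List.mem_iff_getElem.mp hf with ⟨j, hj, rfl⟩
              rw [List.getElem_take]
              exact hL j (by simp at hj; omega) (by simp at hj; omega))
            (hs.sublist (List.take_sublist idx entries))]
        rw [htlast]
      rw [hBL]
      cases hdropc : entries.drop idx with
      | nil =>
        have hin : n ≤ idx := by
          have := congrArg List.length hdropc
          simp [hn.symm] at this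
          omega
        have hWone : W = [eL] := by
          have hone : (min ((n : Int)) ((idx : Int) + 2)).toNat - a.toNat = 1 := by omega
          rw [hW, hone, han, hdrop1, hdropc, List.take_succ_cons, List.take_nil]
        have hminW : PySem.List.min? W key = some eL := by
          rw [hWone, hkey]
          exact min?_cons_of_le x eL [] (by simp)
        rw [hminW, List.foldl_nil]
        exact gate_eq (key eL) tol eL.2
      | cons r rest =>
        have hin : idx < n := by
          by_contra hcon
          have : entries.drop idx = [] := List.drop_eq_nil_of_le (by omega)
          rw [hdropc] at this; simp at this
        have hdropg : entries.drop idx = entries[idx] :: entries.drop (idx + 1) :=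
          List.drop_eq_getElem_cons hin
        have hr : r = entries[idx] := by rw [hdropc] at hdropg; exact (List.cons.injEq .. ▸ hdropg).1
        have hxr : x ≤ r.1 := by rw [hr]; exact hR idx hin (le_refl _)
        have hge_rest : ∀ e ∈ rest, x ≤ e.1 ∧ key r ≤ key e := by
          intro e he
          have hsd : List.Pairwise (fun (a b : Int × String) => a.1 ≤ b.1) (r :: rest) := by
            rw [← hdropc]; exact hs.sublist (List.drop_sublist idx entries)
          have hre : r.1 ≤ e.1 := (List.pairwise_cons.mp hsd).1 e he
          refine ⟨by omega, ?_⟩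
          rw [hkey]
          simp only []
          rw [abs_of_nonneg (by omega), abs_of_nonneg (by omega)]
          omega
        -- the window is eL :: r :: (a prefix of rest)
        obtain ⟨t, ht⟩ : ∃ t, (min ((n : Int)) ((idx : Int) + 2)).toNat - a.toNat = t + 2 :=
          ⟨(min ((n : Int)) ((idx : Int) + 2)).toNat - a.toNat - 2, by omega⟩
        have hWc : W = eL :: r :: rest.take t := by
          rw [hW, ht, han, hdrop1, hdropc, List.take_succ_cons, List.take_succ_cons]
        have hminInner : PySem.List.min? (r :: rest.take t) key = some r := by
          rw [hkey]
          exact min?_cons_of_le x r _ (fun e he => (hge_rest e (List.take_subset _ _ he)).2)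
        have hminW : PySem.List.min? W key = some (if key r < key eL then r else eL) := by
          rw [hWc, min?_cons_int key eL, hminInner]
        rw [hminW]
        -- B: process r, then freeze
        rw [List.foldl_cons]
        by_cases hcmp : key r < key eL
        · have hstep : pvScanStep x (some (key eL, eL.2)) r = some (key r, r.2) := by
            simp only [pvScanStep, hkey]
            rw [if_pos (Or.inl hcmp)]
          rw [hstep, scan_no_update x _ rest (fun e he => hge_rest e he)]
          rw [if_pos hcmp]
          exact gate_eq (key r) tol r.2
        · have hcmp' : ¬ (|r.1 - x| < |eL.1 - x|) := hcmp
          have hstep : pvScanStep x (some (key eL, eL.2)) r = some (key eL, eL.2) := by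
            simp only [pvScanStep, hkey]
            rw [if_neg (by
              rintro (h1 | ⟨h1, h2⟩)
              · exact hcmp' h1
              · omega)]
          rw [hstep, scan_no_update x _ rest
              (fun e he => ⟨(hge_rest e he).1, by
                have hkl : key eL = |eL.1 - x| := rfl
                have h2 : (|r.1 - x| : Int) ≤ |e.1 - x| := (hge_rest e he).2
                omega⟩)]
          rw [if_neg hcmp]
          exact gate_eq (key eL) tol eL.2
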